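-- pv_equiv track=rewrite | github.com/FG-SirVY/AdventOfCode2020 | day16_task2.py | find_possible_field
-- ===== SOURCE A (Python) =====
-- def find_possible_field(tickets, ranges, col):
--     acc = set()
--
--     for i, r in enumerate(ranges):
--         valid = True
--         for ticket in tickets:
--             value = ticket[col]
--             if value < r[0][0] or value > r[1][1] or (value > r[0][1] and value < r[1][0]):
--                 valid = False
--                 break
--
--         if valid:
--             acc.add(i)
--
--     return acc
-- ===== SOURCE B (Python) =====
-- def find_possible_field(tickets, ranges, col):
--     candidates = set(range(len(ranges)))
--
--     for ticket in tickets: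
--         if not candidates:
--             break
--         value = ticket[col]
--         for i in list(candidates):
--             r = ranges[i]
--             if value < r[0][0] or value > r[1][1] or (r[0][1] < value < r[1][0]):
--                 candidates.discard(i)
--
--     return candidates
-- ===== Notes on version B (the rewrite author's own statement) =====
-- stated objective: alternative
-- what changed: B inverts the loop nesting: instead of testing each range independently against all tickets with an early break, it maintains one shrinking candidate set of range indices, scanning tickets once in the outer loop (stopping as soon as no candidate survives) and discarding every still-live range index a ticket's column value falls outside.
import Mathlib
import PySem

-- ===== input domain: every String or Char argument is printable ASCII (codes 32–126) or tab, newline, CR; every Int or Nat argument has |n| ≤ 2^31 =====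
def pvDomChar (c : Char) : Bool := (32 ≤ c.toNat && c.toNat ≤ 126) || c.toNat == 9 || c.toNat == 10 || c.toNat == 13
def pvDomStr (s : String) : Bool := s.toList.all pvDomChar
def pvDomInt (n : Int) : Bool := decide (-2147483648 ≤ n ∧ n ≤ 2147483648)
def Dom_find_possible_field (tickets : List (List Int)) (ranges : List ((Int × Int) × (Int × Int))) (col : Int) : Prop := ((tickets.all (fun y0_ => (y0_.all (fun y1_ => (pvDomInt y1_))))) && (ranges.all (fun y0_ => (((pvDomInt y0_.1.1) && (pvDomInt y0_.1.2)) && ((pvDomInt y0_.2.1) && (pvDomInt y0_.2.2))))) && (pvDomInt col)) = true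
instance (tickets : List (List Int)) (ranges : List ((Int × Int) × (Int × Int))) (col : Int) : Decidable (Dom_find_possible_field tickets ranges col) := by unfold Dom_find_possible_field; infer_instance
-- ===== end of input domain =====

-- B inverts A's loop nesting: one shrinking candidate set of range indices narrowed ticket by ticket
-- (stopping once empty), instead of testing each range independently with an early break (alternative decomposition, same cost).


-- ===== PORT A =====
-- inner 'for ticket in tickets: … break' of A: returns false at the first failing ticket
def pvValidA (tickets : List (List Int)) (col : Int) (r : (Int × Int) × (Int × Int)) : Bool :=
  match tickets with
  | [] => true
  | ticket :: rest =>
    let value := PySem.List.pyGetD ticket col 0  -- ticket[col]; Pre_ keeps every access A performs in range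
    if value < r.1.1 || value > r.2.2 || (value > r.1.2 && value < r.2.1) then false
    else pvValidA rest col r

def find_possible_field (tickets : List (List Int)) (ranges : List ((Int × Int) × (Int × Int))) (col : Int) : List Int :=
  (PySem.List.enumerate ranges 0).foldl
    (fun acc p => if pvValidA tickets col p.2 then PySem.Set.add acc p.1 else acc)
    PySem.Set.empty

-- ===== PORT B =====
-- B's inner 'for i in list(candidates): … discard': fold over a snapshot of the live set
def pvShrink (ranges : List ((Int × Int) × (Int × Int))) (value : Int) (cand : PySem.Set Int) : PySem.Set Int :=
  cand.foldl
    (fun cs i =>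
      let r := PySem.List.pyGetD ranges i ((0, 0), (0, 0))  -- ranges[i]; i is always a live index of ranges
      if value < r.1.1 || value > r.2.2 || (r.1.2 < value && value < r.2.1) then PySem.Set.discard cs i
      else cs)
    cand

-- B's outer 'for ticket in tickets: if not candidates: break; …'
def pvGoB (ranges : List ((Int × Int) × (Int × Int))) (col : Int) : List (List Int) → PySem.Set Int → PySem.Set Int
  | [], cand => cand
  | t :: ts, cand =>
    if cand.isEmpty then cand
    else pvGoB ranges col ts (pvShrink ranges (PySem.List.pyGetD t col 0) cand)

def find_possible_field_alt (tickets : List (List Int)) (ranges : List ((Int × Int) × (Int × Int))) (col : Int) : List Int :=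
  pvGoB ranges col tickets (PySem.Set.ofList (PySem.List.pyRange 0 (PySem.List.len ranges) 1))

-- ===== PRECONDITION & SPEC =====
-- the range-membership test both programs apply (stated once, used by Pre_ and the proofs)
def pvBad (r : (Int × Int) × (Int × Int)) (v : Int) : Bool :=
  v < r.1.1 || v > r.2.2 || (v > r.1.2 && v < r.2.1)

-- Pre_ excludes exactly the inputs where Python A raises IndexError: some ticket k has col out of range
-- and some range's scan reaches ticket k because no earlier (in-range) ticket already failed it; on every
-- such input B raises IndexError too (its candidate set is still non-empty when ticket k is reached).
def Pre_find_possible_field (tickets : List (List Int)) (ranges : List ((Int × Int) × (Int × Int))) (col : Int) : Prop :=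
  ∀ k < tickets.length, ¬ PySem.Raise.InRange (tickets.getD k []).length col →
    ∀ r ∈ ranges, ∃ j < k, PySem.Raise.InRange (tickets.getD j []).length col ∧
      pvBad r (PySem.List.pyGetD (tickets.getD j []) col 0) = true
instance (tickets : List (List Int)) (ranges : List ((Int × Int) × (Int × Int))) (col : Int) : Decidable (Pre_find_possible_field tickets ranges col) := by unfold Pre_find_possible_field; infer_instance

def pvWitness_find_possible_field : List (List Int) × (List ((Int × Int) × (Int × Int))) × Int :=
  ([[3], [10]], [((1, 4), (6, 11)), ((5, 6), (7, 8))], 0)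

def Spec_find_possible_field (tickets : List (List Int)) (ranges : List ((Int × Int) × (Int × Int))) (col : Int) (out : List Int) : Prop := out = find_possible_field_alt tickets ranges col
instance (tickets : List (List Int)) (ranges : List ((Int × Int) × (Int × Int))) (col : Int) (out : List Int) : Decidable (Spec_find_possible_field tickets ranges col out) := by unfold Spec_find_possible_field; infer_instance

-- ===== CLAIM (what is proved, stated in full; the proofs are below) =====
def Claim_equal_find_possible_field : Prop := ∀ (tickets : List (List Int)) (ranges : List ((Int × Int) × (Int × Int))) (col : Int), Dom_find_possible_field tickets ranges col → Pre_find_possible_field tickets ranges col → Spec_find_possible_field tickets ranges col (find_possible_field tickets ranges col)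

-- ===== LEMMAS AND PROOFS =====

theorem pvValidA_eq_all (tickets : List (List Int)) (col : Int) (r : (Int × Int) × (Int × Int)) :
    pvValidA tickets col r = tickets.all (fun t => !pvBad r (PySem.List.pyGetD t col 0)) := by
  induction tickets with
  | nil => rfl
  | cons t rest ih =>
    simp only [pvValidA, List.all_cons, pvBad, ih]
    by_cases h : (PySem.List.pyGetD t col 0 < r.1.1 || PySem.List.pyGetD t col 0 > r.2.2 ||
        (PySem.List.pyGetD t col 0 > r.1.2 && PySem.List.pyGetD t col 0 < r.2.1)) = true <;>
      simp [h]

-- A's outer fold from an accumulator holding only indices below the enumeration start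
theorem pvA_fold (tickets : List (List Int)) (col : Int) :
    ∀ (l : List ((Int × Int) × (Int × Int))) (s : Int) (acc : List Int), (∀ x ∈ acc, x < s) →
      (PySem.List.enumerate l s).foldl
        (fun acc p => if pvValidA tickets col p.2 then PySem.Set.add acc p.1 else acc) acc
      = acc ++ ((PySem.List.enumerate l s).filter (fun p => pvValidA tickets col p.2)).map Prod.fst := by
  intro l
  induction l with
  | nil => intro s acc _; simp [PySem.List.enumerate_nil]
  | cons r rest ih =>
    intro s acc hacc
    rw [PySem.List.enumerate_cons]
    by_cases h : pvValidA tickets col r = true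
    · have hs : s ∉ acc := fun hmem => lt_irrefl s (hacc s hmem)
      have harg : ∀ x ∈ acc ++ [s], x < s + 1 := by
        intro x hx
        rcases List.mem_append.mp hx with hx | hx
        · exact lt_trans (hacc x hx) (by omega)
        · simp only [List.mem_singleton] at hx; omega
      simp only [List.foldl_cons, List.filter_cons, h, if_true,
        PySem.Set.add_of_not_mem hs]
      rw [ih (s + 1) (acc ++ [s]) harg]
      simp
    · simp only [List.foldl_cons, List.filter_cons, h, Bool.false_eq_true, if_false]
      exact ih (s + 1) acc (fun x hx => lt_trans (hacc x hx) (by omega))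

-- B's inner fold: discarding along a snapshot is filtering by the snapshot's failing members
theorem pvDiscard_fold (bad : Int → Bool) :
    ∀ (l cs : List Int),
      l.foldl (fun cs i => if bad i then PySem.Set.discard cs i else cs) cs
      = cs.filter (fun x => !(l.contains x && bad x)) := by
  intro l
  induction l with
  | nil => intro cs; simp
  | cons a rest ih =>
    intro cs
    by_cases h : bad a = true
    · simp only [List.foldl_cons, if_pos h]
      rw [ih]
      show (cs.filter (fun y => !(y == a))).filter _ = _
      rw [List.filter_filter]
      apply List.filter_congr
      intro x _
      by_cases hxa : x = a <;> simp [hxa, h]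
    · simp only [List.foldl_cons, if_neg h]
      rw [ih]
      apply List.filter_congr
      intro x _
      by_cases hxa : x = a <;> simp [hxa, h]

theorem pvShrink_eq_filter (ranges : List ((Int × Int) × (Int × Int))) (v : Int) (cand : PySem.Set Int) :
    pvShrink ranges v cand = cand.filter (fun i => !pvBad (PySem.List.pyGetD ranges i ((0, 0), (0, 0))) v) := by
  unfold pvShrink
  have : ∀ cs : List Int, cand.foldl
      (fun cs i =>
        if v < (PySem.List.pyGetD ranges i ((0, 0), (0, 0))).1.1 ||
            v > (PySem.List.pyGetD ranges i ((0, 0), (0, 0))).2.2 ||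
            ((PySem.List.pyGetD ranges i ((0, 0), (0, 0))).1.2 < v &&
              v < (PySem.List.pyGetD ranges i ((0, 0), (0, 0))).2.1)
        then PySem.Set.discard cs i else cs) cs
      = cs.filter (fun x => !(cand.contains x && pvBad (PySem.List.pyGetD ranges x ((0, 0), (0, 0))) v)) := by
    intro cs
    have := pvDiscard_fold (fun i => pvBad (PySem.List.pyGetD ranges i ((0, 0), (0, 0))) v) cand cs
    simpa [pvBad, gt_iff_lt] using this
  rw [this cand]
  apply List.filter_congr
  intro x hx
  have hc : cand.contains x = true := by simpa using hx
  show (!(cand.contains x && pvBad (PySem.List.pyGetD ranges x ((0, 0), (0, 0))) v)) = _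
  rw [hc, Bool.true_and]

-- once the candidate set is empty every later shrink keeps it empty
theorem pvShrink_foldl_nil (ranges : List ((Int × Int) × (Int × Int))) (col : Int) :
    ∀ ts : List (List Int),
      ts.foldl (fun cand ticket => pvShrink ranges (PySem.List.pyGetD ticket col 0) cand) [] = [] := by
  intro ts
  induction ts with
  | nil => rfl
  | cons t rest ih => simpa [pvShrink] using ih

-- B's early exit is invisible in the result: pvGoB equals the plain fold of shrinks
theorem pvGoB_eq_foldl (ranges : List ((Int × Int) × (Int × Int))) (col : Int) :
    ∀ (ts : List (List Int)) (c : PySem.Set Int),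
      pvGoB ranges col ts c
      = ts.foldl (fun cand ticket => pvShrink ranges (PySem.List.pyGetD ticket col 0) cand) c := by
  intro ts
  induction ts with
  | nil => intro c; rfl
  | cons t rest ih =>
    intro c
    by_cases hc : c = []
    · subst hc
      simp only [pvGoB, List.isEmpty_nil, if_true, List.foldl_cons]
      have h0 : pvShrink ranges (PySem.List.pyGetD t col 0) [] = [] := rfl
      rw [h0, pvShrink_foldl_nil]
    · simp only [pvGoB, List.isEmpty_iff, hc, if_false, List.foldl_cons]
      exact ih _

theorem pvB_fold (ranges : List ((Int × Int) × (Int × Int))) (col : Int) :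
    ∀ (ts : List (List Int)) (c : List Int),
      ts.foldl (fun cand ticket => pvShrink ranges (PySem.List.pyGetD ticket col 0) cand) c
      = c.filter (fun i => ts.all (fun t => !pvBad (PySem.List.pyGetD ranges i ((0, 0), (0, 0))) (PySem.List.pyGetD t col 0))) := by
  intro ts
  induction ts with
  | nil => intro c; simp
  | cons t rest ih =>
    intro c
    simp only [List.foldl_cons]
    rw [pvShrink_eq_filter, ih, List.filter_filter]
    apply List.filter_congr
    intro x _
    simp [List.all_cons, Bool.and_comm]

-- ===== VERDICT (by name: the statement is the Claim_ definition above) =====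
theorem find_possible_field_spec : Claim_equal_find_possible_field := by
  intro tickets ranges col _ _
  unfold Spec_find_possible_field find_possible_field find_possible_field_alt
  rw [pvA_fold tickets col ranges 0 PySem.Set.empty (by intro x hx; cases hx)]
  rw [pvGoB_eq_foldl]
  rw [pvB_fold ranges col tickets
    (PySem.Set.ofList (PySem.List.pyRange 0 (PySem.List.len ranges) 1))]
  rw [PySem.Set.ofList_eq_self_of_nodup _ (by simpa using PySem.List.nodup_pyRange_one 0 (PySem.List.len ranges))]
  rw [PySem.List.enumerate_eq_map_pyRange ranges ((0, 0), (0, 0))]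
  rw [List.filter_map, List.map_map]
  rw [show (Prod.fst ∘ fun j : Int => (j, PySem.List.pyGetD ranges j ((0, 0), (0, 0)))) = (fun j : Int => j) from rfl]
  rw [List.map_id']
  rw [show (PySem.Set.empty : List Int) = [] from rfl, List.nil_append]
  exact List.filter_congr (fun j _ => pvValidA_eq_all tickets col _)
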